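-- pv_equiv track=rewrite | github.com/MrBrantCode/unitest_baseline | mut_generate/mist_train_taco/taco_12685/solution.py | reduce_string_for_slugtera
-- ===== SOURCE A (Python) =====
-- def reduce_string_for_slugtera(T, strings):
--     results = []
--
--     for s in strings:
--         if 'x' not in s or 'o' not in s:
--             results.append(s)
--         elif '*' not in s and 'o' in s:
--             results.append(s.replace('o', ''))
--         elif '*' in s:
--             s2 = ''
--             for char in s:
--                 if char == '*':
--                     s2 += '.' + char + '.'
--                 else:
--                     s2 += char
--             parts = s2.split('.')
--             reduced_parts = []
--             for part in parts:
--                 if part == "":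
--                     continue
--                 elif 'x' in part and 'o' in part:
--                     reduced_parts.append(part.replace('o', ''))
--                 else:
--                     reduced_parts.append(part)
--             results.append(''.join(reduced_parts))
--
--     return results
-- ===== SOURCE B (Python) =====
-- def _flush(buf):
--     return buf.replace('o', '') if ('x' in buf and 'o' in buf) else buf
--
-- def reduce_string_for_slugtera(T, strings):
--     results = []
--     for s in strings:
--         if 'x' not in s or 'o' not in s:
--             results.append(s)
--         elif '*' not in s and 'o' in s:
--             results.append(s.replace('o', ''))
--         else:
--             # single pass: '.' and '*' both end the current segment ('.' is
--             # dropped, '*' is kept as its own piece); each finished segment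
--             # loses its 'o's iff it contains both 'x' and 'o'
--             pieces = []
--             buf = ''
--             for ch in s:
--                 if ch == '*':
--                     pieces.append(_flush(buf))
--                     pieces.append('*')
--                     buf = ''
--                 elif ch == '.':
--                     pieces.append(_flush(buf))
--                     buf = ''
--                 else:
--                     buf += ch
--             pieces.append(_flush(buf))
--             results.append(''.join(pieces))
--     return results
-- ===== Notes on version B (the rewrite author's own statement) =====
-- stated objective: alternative
-- what changed: The '*' branch no longer builds a doubled string ('*' -> '.*.'), splits it on '.' and post-processes the parts in a second pass; B does one character scan keeping a current-segment buffer, flushing it (with 'o' removed iff the segment contains both 'x' and 'o') at every '.' or '*', dropping dots and emitting '*' as its own piece.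
import Mathlib
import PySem

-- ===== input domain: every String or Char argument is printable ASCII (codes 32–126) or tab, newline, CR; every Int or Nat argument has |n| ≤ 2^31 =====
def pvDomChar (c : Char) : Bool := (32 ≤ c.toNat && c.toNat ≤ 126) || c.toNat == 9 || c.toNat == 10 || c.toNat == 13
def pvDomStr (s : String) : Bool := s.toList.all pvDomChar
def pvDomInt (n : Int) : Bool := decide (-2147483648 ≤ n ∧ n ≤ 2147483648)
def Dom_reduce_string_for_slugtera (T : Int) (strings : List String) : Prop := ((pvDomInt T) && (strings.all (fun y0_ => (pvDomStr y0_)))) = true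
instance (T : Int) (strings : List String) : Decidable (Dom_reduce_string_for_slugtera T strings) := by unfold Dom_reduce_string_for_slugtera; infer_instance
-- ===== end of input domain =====

-- B replaces A's dot-doubling ('*' → '.*.'), split('.') and second pass over the parts by a
-- single character scan with a segment buffer; same return value, objective: alternative decomposition.

-- ===== PORT A =====
def reduce_string_for_slugtera (T : Int) (strings : List String) : List String :=
  strings.foldl (fun results s =>
    if !(PySem.Str.isIn "x" s) || !(PySem.Str.isIn "o" s) then
      results ++ [s]
    else if !(PySem.Str.isIn "*" s) && PySem.Str.isIn "o" s then
      results ++ [PySem.Str.replace s "o" ""]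
    else if PySem.Str.isIn "*" s then
      let s2 := s.toList.foldl (fun s2 c => if c = '*' then s2 ++ ['.', c, '.'] else s2 ++ [c]) []
      let parts := PySem.Chars.splitOn s2 ['.']
      let reduced_parts := parts.foldl (fun rp part =>
        if part = [] then rp
        else if PySem.Chars.isIn ['x'] part && PySem.Chars.isIn ['o'] part then
          rp ++ [PySem.Chars.replace part ['o'] []]
        else rp ++ [part]) []
      results ++ [String.mk (PySem.Chars.join [] reduced_parts)]
    else results) []

-- ===== PORT B =====
-- B-side helper: a finished segment loses its 'o's iff it contains both 'x' and 'o'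
def pvFlush (buf : List Char) : List Char :=
  if PySem.Chars.isIn ['x'] buf && PySem.Chars.isIn ['o'] buf then PySem.Chars.replace buf ['o'] [] else buf

def reduce_string_for_slugtera_alt (T : Int) (strings : List String) : List String :=
  strings.foldl (fun results s =>
    if !(PySem.Str.isIn "x" s) || !(PySem.Str.isIn "o" s) then
      results ++ [s]
    else if !(PySem.Str.isIn "*" s) && PySem.Str.isIn "o" s then
      results ++ [PySem.Str.replace s "o" ""]
    else
      let st := s.toList.foldl (fun st ch =>
        if ch = '*' then (st.1 ++ [pvFlush st.2, ['*']], ([] : List Char))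
        else if ch = '.' then (st.1 ++ [pvFlush st.2], ([] : List Char))
        else (st.1, st.2 ++ [ch])) (([] : List (List Char)), ([] : List Char))
      results ++ [String.mk (PySem.Chars.join [] (st.1 ++ [pvFlush st.2]))]) []

-- ===== PRECONDITION & SPEC =====
def Spec_reduce_string_for_slugtera (T : Int) (strings : List String) (out : List String) : Prop := out = reduce_string_for_slugtera_alt T strings
instance (T : Int) (strings : List String) (out : List String) : Decidable (Spec_reduce_string_for_slugtera T strings out) := by unfold Spec_reduce_string_for_slugtera; infer_instance

-- ===== CLAIM (what is proved, stated in full; the proofs are below) =====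
def Claim_equal_reduce_string_for_slugtera : Prop := ∀ (T : Int) (strings : List String), Dom_reduce_string_for_slugtera T strings → Spec_reduce_string_for_slugtera T strings (reduce_string_for_slugtera T strings)

-- ===== LEMMAS AND PROOFS =====

-- Python's str.split('.') as a plain structural recursion (proof-side view of PySem.Chars.splitOn)
def pvDsplit : List Char → List (List Char)
  | [] => [[]]
  | c :: t => if c = '.' then [] :: pvDsplit t else (c :: (pvDsplit t).headI) :: (pvDsplit t).tail

theorem pvDsplit_ne_nil (l : List Char) : pvDsplit l ≠ [] := by
  cases l with
  | nil => simp [pvDsplit]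
  | cons c t => by_cases h : c = '.' <;> simp [pvDsplit, h]

theorem pvDsplit_headI_tail (l : List Char) : (pvDsplit l).headI :: (pvDsplit l).tail = pvDsplit l := by
  cases h : pvDsplit l with
  | nil => exact absurd h (pvDsplit_ne_nil l)
  | cons p ps => rfl

theorem pvGo_eq (l : List Char) : ∀ (fuel : Nat) (cur : List Char) (acc : List (List Char)),
    l.length ≤ fuel →
    PySem.Chars.splitOn.go ['.'] fuel l cur acc
      = acc.reverse ++ (cur.reverse ++ (pvDsplit l).headI) :: (pvDsplit l).tail := by
  induction l with
  | nil =>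
    intro fuel cur acc _
    cases fuel <;> simp [pvDsplit, PySem.Chars.splitOn.go]
  | cons c t ih =>
    intro fuel cur acc hle
    cases fuel with
    | zero => simp at hle
    | succ fuel =>
      by_cases h : c = '.'
      · subst h
        have : PySem.Chars.splitOn.go ['.'] (fuel+1) ('.'::t) cur acc
            = PySem.Chars.splitOn.go ['.'] fuel t [] (cur.reverse :: acc) := by
          simp [PySem.Chars.splitOn.go, List.isPrefixOf]
        rw [this, ih fuel [] (cur.reverse :: acc) (by simpa using hle)]
        simp [pvDsplit, pvDsplit_headI_tail]
      · have : PySem.Chars.splitOn.go ['.'] (fuel+1) (c::t) cur acc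
            = PySem.Chars.splitOn.go ['.'] fuel t (c :: cur) acc := by
          simp [PySem.Chars.splitOn.go, List.isPrefixOf, Ne.symm h]
        rw [this, ih fuel (c :: cur) acc (by simpa using hle)]
        simp [pvDsplit, h]

theorem splitOn_eq_pvDsplit (l : List Char) : PySem.Chars.splitOn l ['.'] = pvDsplit l := by
  have := pvGo_eq l (l.length + 1) [] [] (by omega)
  simpa [PySem.Chars.splitOn, List.headI_cons] using
    this.trans (by cases h : pvDsplit l with
    | nil => exact absurd h (pvDsplit_ne_nil l)
    | cons p ps => simp [h])

theorem pvDsplit_no_dot (buf : List Char) (h : '.' ∉ buf) : pvDsplit buf = [buf] := by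
  induction buf with
  | nil => rfl
  | cons c t ih =>
    simp at h
    simp [pvDsplit, Ne.symm h.1, ih h.2]

theorem pvDsplit_append (buf l : List Char) (h : '.' ∉ buf) :
    pvDsplit (buf ++ l) = (buf ++ (pvDsplit l).headI) :: (pvDsplit l).tail := by
  induction buf with
  | nil =>
    cases hl : pvDsplit l with
    | nil => exact absurd hl (pvDsplit_ne_nil l)
    | cons p ps => simp [hl]
  | cons c t ih =>
    simp at h
    simp [pvDsplit, Ne.symm h.1, ih h.2]

theorem pvJoin_flatten (l : List (List Char)) : PySem.Chars.join [] l = l.flatten := by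
  induction l with
  | nil => rfl
  | cons p ps ih =>
    cases ps with
    | nil => simp [PySem.Chars.join_singleton]
    | cons q rest => rw [PySem.Chars.join_cons_cons]; simp_all

theorem pvFlush_nil : pvFlush [] = [] := by decide

theorem pvFlush_star : pvFlush ['*'] = ['*'] := by decide

-- A's reduced_parts loop, flattened, is flatMap pvFlush (empty parts contribute nothing)
theorem pvFoldA_flatten (parts : List (List Char)) (acc : List (List Char)) :
    (parts.foldl (fun rp part =>
        if part = [] then rp
        else if PySem.Chars.isIn ['x'] part && PySem.Chars.isIn ['o'] part then
          rp ++ [PySem.Chars.replace part ['o'] []]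
        else rp ++ [part]) acc).flatten
      = acc.flatten ++ parts.flatMap pvFlush := by
  induction parts generalizing acc with
  | nil => simp
  | cons p ps ih =>
    rw [List.foldl_cons]
    by_cases hp : p = []
    · rw [if_pos hp, ih]; subst hp; simp [pvFlush_nil]
    · rw [if_neg hp]
      by_cases hxo : (PySem.Chars.isIn ['x'] p && PySem.Chars.isIn ['o'] p) = true
      · rw [if_pos hxo, ih]; simp [pvFlush, hxo]
      · rw [if_neg hxo, ih]; simp [pvFlush, hxo]

-- A's s2-building loop is a flatMap
theorem pvExpand_foldl (cs : List Char) (acc : List Char) :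
    cs.foldl (fun s2 c => if c = '*' then s2 ++ ['.', c, '.'] else s2 ++ [c]) acc
      = acc ++ cs.flatMap (fun c => if c = '*' then ['.', c, '.'] else [c]) := by
  have h : (fun (s2 : List Char) (c : Char) => if c = '*' then s2 ++ ['.', c, '.'] else s2 ++ [c])
      = fun s2 c => s2 ++ (if c = '*' then ['.', c, '.'] else [c]) := by
    funext s2 c; split <;> rfl
  rw [h, PySem.List.foldl_append_eq_flatMap]

-- Main invariant: B's scan equals A's split-then-reduce, flattened
theorem pvScan_eq (cs : List Char) :
    ∀ (pieces : List (List Char)) (buf : List Char), '.' ∉ buf →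
    (let st := cs.foldl (fun st ch =>
        if ch = '*' then (st.1 ++ [pvFlush st.2, ['*']], ([] : List Char))
        else if ch = '.' then (st.1 ++ [pvFlush st.2], ([] : List Char))
        else (st.1, st.2 ++ [ch])) (pieces, buf)
     st.1.flatten ++ pvFlush st.2)
      = pieces.flatten
        ++ (pvDsplit (buf ++ cs.flatMap (fun c => if c = '*' then ['.', c, '.'] else [c]))).flatMap pvFlush := by
  induction cs with
  | nil =>
    intro pieces buf hbuf
    simp [pvDsplit_no_dot buf hbuf]
  | cons c t ih =>
    intro pieces buf hbuf
    by_cases hstar : c = '*'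
    · subst hstar
      have := ih (pieces ++ [pvFlush buf, ['*']]) [] (by simp)
      simp only [List.foldl_cons, reduceIte] at this ⊢
      rw [this]
      rw [show buf ++ (('*'::t).flatMap (fun c => if c = '*' then ['.', c, '.'] else [c]))
            = buf ++ '.' :: '*' :: '.' :: (t.flatMap (fun c => if c = '*' then ['.', c, '.'] else [c])) by simp]
      rw [pvDsplit_append buf _ hbuf]
      simp [pvDsplit, pvFlush_star]
    · by_cases hdot : c = '.'
      · subst hdot
        have := ih (pieces ++ [pvFlush buf]) [] (by simp)
        simp only [List.foldl_cons, reduceIte] at this ⊢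
        rw [if_neg (by decide : ¬(('.' : Char) = '*'))]
        rw [this]
        rw [show buf ++ (('.'::t).flatMap (fun c => if c = '*' then ['.', c, '.'] else [c]))
              = buf ++ '.' :: (t.flatMap (fun c => if c = '*' then ['.', c, '.'] else [c])) by simp]
        rw [pvDsplit_append buf _ hbuf]
        simp [pvDsplit]
      · have hb : '.' ∉ buf ++ [c] := by
          simp only [List.mem_append, List.mem_singleton]
          exact fun h => h.elim (fun h => hbuf h) (fun e => hdot e.symm)
        have := ih pieces (buf ++ [c]) hb
        simp only [List.foldl_cons, if_neg hstar, if_neg hdot] at this ⊢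
        rw [this]
        rw [show (buf ++ [c]) ++ (t.flatMap (fun c => if c = '*' then ['.', c, '.'] else [c]))
              = buf ++ ((c::t).flatMap (fun c => if c = '*' then ['.', c, '.'] else [c])) by simp [hstar]]

-- per-string agreement of the two loop bodies
theorem pvStep_eq (results : List String) (s : String) :
    (if !(PySem.Str.isIn "x" s) || !(PySem.Str.isIn "o" s) then
      results ++ [s]
    else if !(PySem.Str.isIn "*" s) && PySem.Str.isIn "o" s then
      results ++ [PySem.Str.replace s "o" ""]
    else if PySem.Str.isIn "*" s then
      let s2 := s.toList.foldl (fun s2 c => if c = '*' then s2 ++ ['.', c, '.'] else s2 ++ [c]) []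
      let parts := PySem.Chars.splitOn s2 ['.']
      let reduced_parts := parts.foldl (fun rp part =>
        if part = [] then rp
        else if PySem.Chars.isIn ['x'] part && PySem.Chars.isIn ['o'] part then
          rp ++ [PySem.Chars.replace part ['o'] []]
        else rp ++ [part]) []
      results ++ [String.mk (PySem.Chars.join [] reduced_parts)]
    else results)
    = (if !(PySem.Str.isIn "x" s) || !(PySem.Str.isIn "o" s) then
      results ++ [s]
    else if !(PySem.Str.isIn "*" s) && PySem.Str.isIn "o" s then
      results ++ [PySem.Str.replace s "o" ""]
    else
      let st := s.toList.foldl (fun st ch =>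
        if ch = '*' then (st.1 ++ [pvFlush st.2, ['*']], ([] : List Char))
        else if ch = '.' then (st.1 ++ [pvFlush st.2], ([] : List Char))
        else (st.1, st.2 ++ [ch])) (([] : List (List Char)), ([] : List Char))
      results ++ [String.mk (PySem.Chars.join [] (st.1 ++ [pvFlush st.2]))]) := by
  by_cases h1 : (!(PySem.Str.isIn "x" s) || !(PySem.Str.isIn "o" s)) = true
  · simp only [if_pos h1]
  · simp only [if_neg h1]
    by_cases h2 : (!(PySem.Str.isIn "*" s) && PySem.Str.isIn "o" s) = true
    · simp only [if_pos h2]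
    · simp only [if_neg h2]
      have hstar : PySem.Str.isIn "*" s = true := by
        cases hx : PySem.Str.isIn "*" s with
        | true => rfl
        | false =>
          exfalso
          cases ho : PySem.Str.isIn "o" s with
          | false => exact h1 (by rw [ho]; simp)
          | true => exact h2 (by rw [hx, ho]; rfl)
      simp only [if_pos hstar]
      congr 1
      congr 1
      congr 1
      rw [pvJoin_flatten, pvJoin_flatten, List.flatten_append]
      rw [pvExpand_foldl, List.nil_append, splitOn_eq_pvDsplit, pvFoldA_flatten]
      have hscan := pvScan_eq s.toList [] [] (by simp)
      simp only [List.flatten_nil, List.flatten_cons, List.append_nil, List.nil_append] at hscan ⊢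
      exact hscan.symm

-- ===== VERDICT (by name: the statement is the Claim_ definition above) =====
theorem reduce_string_for_slugtera_spec : Claim_equal_reduce_string_for_slugtera := by
  intro T strings hdom
  clear hdom
  unfold Spec_reduce_string_for_slugtera reduce_string_for_slugtera reduce_string_for_slugtera_alt
  induction strings using List.reverseRecOn with
  | nil => rfl
  | append_singleton init s ih =>
    rw [List.foldl_append, List.foldl_append, ← ih]
    simp only [List.foldl_cons, List.foldl_nil]
    exact pvStep_eq _ s
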